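-- pv_equiv track=rewrite | github.com/thalesgmendes/processamento-sinais-digitais | codigo/pds.py | atraso
-- ===== SOURCE A (Python) =====
-- def atraso(y, n, x):
--     l2 = x.copy()
--     if n >=0:
--         l = [0 if i < n else y[i - n] for i in range(len(y) + n)]
--         for i in range(n):
--             l2.append(l2[-1] + 1)
--     else:
--         l = [0 if i >= len(y)+n else y[i - n] for i in range(len(y) - n)]
--         for i in range(-n):
--             l2.insert(0 ,l2[0] - 1)
--     return l, l2
-- ===== SOURCE B (Python) =====
-- def atraso(y, n, x):
--     # Branch-free: embed y on a zero-padded line and slice the output window;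
--     # extend the index axis by arithmetic from x's endpoints (no loop state).
--     m, p = max(-n, 0), max(n, 0)
--     l = ([0] * p + list(y) + [0] * (2 * m))[m:]
--     l2 = [x[0] - m + i for i in range(m)] + list(x) + [x[-1] + 1 + i for i in range(p)]
--     return l, l2
-- ===== Notes on version B (the rewrite author's own statement) =====
-- stated objective: alternative
-- what changed: Replaces A's sign-branch with a branch-free construction: the shifted signal is read off as one slice of a single zero-padded line ([0]*p + y + [0]*2m)[m:], and the index axis is extended purely by arithmetic on x's endpoints instead of A's append/insert loop that re-reads the growing list's end element at every step.
import Mathlib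
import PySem

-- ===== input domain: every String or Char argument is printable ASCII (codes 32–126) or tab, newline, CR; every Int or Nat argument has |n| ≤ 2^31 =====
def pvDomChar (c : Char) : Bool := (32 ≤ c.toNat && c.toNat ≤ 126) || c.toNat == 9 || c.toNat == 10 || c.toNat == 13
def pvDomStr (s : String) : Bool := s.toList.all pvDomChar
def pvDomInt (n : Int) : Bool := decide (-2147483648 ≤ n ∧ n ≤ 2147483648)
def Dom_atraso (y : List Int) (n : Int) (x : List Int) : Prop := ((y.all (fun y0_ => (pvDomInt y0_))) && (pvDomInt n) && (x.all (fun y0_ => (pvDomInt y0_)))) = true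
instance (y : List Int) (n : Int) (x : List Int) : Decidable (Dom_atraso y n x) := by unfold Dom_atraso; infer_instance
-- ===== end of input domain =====

-- B is branch-free: one zero-padded line sliced to the output window, and an arithmetic
-- index extension from x's endpoints, instead of A's sign-branched comprehension and
-- append/insert loop; objective: alternative (same cost, different construction).

-- ===== PORT A =====
-- Literal port of A.  pyGetD's default 0 is only reachable where the Python raises
-- IndexError (l2[-1]/l2[0] on empty x with n ≠ 0, excluded by Pre_); y[i-n] is always in range.
def atraso (y : List Int) (n : Int) (x : List Int) : List Int × List Int :=
  let l2 := x
  if n ≥ 0 then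
    let l := (PySem.List.pyRange 0 ((y.length : Int) + n) 1).map
      (fun i => if i < n then 0 else PySem.List.pyGetD y (i - n) 0)
    let l2 := (PySem.List.pyRange 0 n 1).foldl
      (fun l2 _ => l2 ++ [PySem.List.pyGetD l2 (-1) 0 + 1]) l2
    (l, l2)
  else
    let l := (PySem.List.pyRange 0 ((y.length : Int) - n) 1).map
      (fun i => if i ≥ (y.length : Int) + n then 0 else PySem.List.pyGetD y (i - n) 0)
    let l2 := (PySem.List.pyRange 0 (-n) 1).foldl
      (fun l2 _ => (PySem.List.pyGetD l2 0 0 - 1) :: l2) l2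
    (l, l2)

-- ===== PORT B =====
-- Literal port of Source B.  x[0]/x[-1] (pyGetD default 0) is only reachable where the Python
-- raises IndexError (empty x with n ≠ 0, excluded by Pre_).
def atraso_alt (y : List Int) (n : Int) (x : List Int) : List Int × List Int :=
  let m := max (-n) 0
  let p := max n 0
  let l := PySem.List.slice
    (List.replicate p.toNat 0 ++ y ++ List.replicate (2 * m).toNat 0) (some m) none
  let l2 := (PySem.List.pyRange 0 m 1).map (fun i => PySem.List.pyGetD x 0 0 - m + i)
    ++ x
    ++ (PySem.List.pyRange 0 p 1).map (fun i => PySem.List.pyGetD x (-1) 0 + 1 + i)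
  (l, l2)

-- ===== PRECONDITION & SPEC =====
-- Pre_ excludes exactly the inputs where A raises IndexError: empty x with n ≠ 0
-- (A reads l2[-1] resp. l2[0] of the empty index list; B raises there too).
def Pre_atraso (y : List Int) (n : Int) (x : List Int) : Prop := n = 0 ∨ x ≠ []
instance (y : List Int) (n : Int) (x : List Int) : Decidable (Pre_atraso y n x) := by unfold Pre_atraso; infer_instance
def pvWitness_atraso : List Int × Int × List Int := ([1, 2, 3], 2, [5, 6, 7])

def Spec_atraso (y : List Int) (n : Int) (x : List Int) (out : List Int × List Int) : Prop := out = atraso_alt y n x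
instance (y : List Int) (n : Int) (x : List Int) (out : List Int × List Int) : Decidable (Spec_atraso y n x out) := by unfold Spec_atraso; infer_instance

-- ===== CLAIM (what is proved, stated in full; the proofs are below) =====
def Claim_equal_atraso : Prop := ∀ (y : List Int) (n : Int) (x : List Int), Dom_atraso y n x → Pre_atraso y n x → Spec_atraso y n x (atraso y n x)

-- ===== LEMMAS AND PROOFS =====

-- A's comprehension for n >= 0 is the block [0]*n ++ y.
theorem l_pos (y : List Int) (k : Nat) :
    (PySem.List.pyRange 0 ((y.length : Int) + (k : Int)) 1).map
      (fun i => if i < (k : Int) then 0 else PySem.List.pyGetD y (i - (k : Int)) 0)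
    = List.replicate k 0 ++ y := by
  rw [PySem.List.pyRange_one_append 0 (k : Int) ((y.length : Int) + (k : Int)) (by positivity) (by omega)]
  rw [List.map_append]
  congr 1
  · rw [List.eq_replicate_iff]
    refine ⟨by simp [PySem.List.length_pyRange_one], ?_⟩
    intro b hb
    simp only [List.mem_map] at hb
    obtain ⟨i, hi, rfl⟩ := hb
    rw [PySem.List.mem_pyRange_one] at hi
    simp [hi.2]
  · rw [PySem.List.pyRange_one]
    have : (((y.length : Int) + (k : Int)) - (k : Int)).toNat = y.length := by omega
    rw [this, List.map_map]
    have h2 : ∀ j ∈ List.range y.length,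
        ((fun i => if i < (k : Int) then 0 else PySem.List.pyGetD y (i - (k : Int)) 0) ∘ fun j : Nat => (k : Int) + j) j
        = y.getD j 0 := by
      intro j hj
      simp only [Function.comp]
      rw [if_neg (by omega)]
      have : (k : Int) + (j : Int) - (k : Int) = (j : Int) := by omega
      rw [this, PySem.List.pyGetD_natCast]
    rw [List.map_congr_left h2]
    apply List.ext_getElem (by simp)
    intro i h1 h2
    simp [List.getD_eq_getElem?_getD, List.getElem?_eq_getElem h2]

-- A's append loop for n >= 0 is x plus an arithmetic progression from x's last element.
theorem l2_pos (k : Nat) (x : List Int) :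
    (k = 0 ∨ x ≠ []) →
    (PySem.List.pyRange 0 (k : Int) 1).foldl
      (fun l2 _ => l2 ++ [PySem.List.pyGetD l2 (-1) 0 + 1]) x
    = x ++ (PySem.List.pyRange 1 ((k : Int) + 1) 1).map
        (fun i => PySem.List.pyGetD x (-1) 0 + i) := by
  intro h
  induction k with
  | zero =>
    simp [PySem.List.pyRange_one_eq_nil]
  | succ k ih =>
    rcases h with h | hx
    · omega
    have ihv := ih (Or.inr hx)
    have hc : ((k + 1 : Nat) : Int) = (k : Int) + 1 := by push_cast; ring
    rw [hc, PySem.List.pyRange_one_succ_right (by positivity : (0:Int) ≤ (k:Int)), List.foldl_append, ihv]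
    rw [PySem.List.pyRange_one_succ_right (by omega : (1:Int) ≤ (k:Int)+1)]
    rw [List.map_append]
    have hlast : PySem.List.pyGetD (x ++ (PySem.List.pyRange 1 ((k : Int) + 1) 1).map
        (fun i => PySem.List.pyGetD x (-1) 0 + i)) (-1) 0 = PySem.List.pyGetD x (-1) 0 + (k : Int) := by
      rcases Nat.eq_zero_or_pos k with hk | hk
      · subst hk
        simp [PySem.List.pyRange_one_eq_nil]
      · rw [PySem.List.pyRange_one_succ_right (by omega : (1:Int) ≤ (k:Int)), List.map_append]
        simp only [List.map_cons, List.map_nil, ← List.append_assoc, PySem.List.pyGetD_neg_one_append_singleton]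
    simp only [List.foldl_cons, List.foldl_nil, hlast, List.append_assoc]
    congr 3
    ring

-- A's comprehension for n < 0 is y with the first m dropped, padded with zeros to length len(y)+m.
theorem l_neg (y : List Int) (m : Nat) (hm : 0 < m) :
    (PySem.List.pyRange 0 ((y.length : Int) + (m : Int)) 1).map
      (fun i => if i ≥ (y.length : Int) - (m : Int) then 0 else PySem.List.pyGetD y (i + (m : Int)) 0)
    = y.drop m ++ List.replicate ((y.length : Int) + (m : Int) - ((y.drop m).length : Int)).toNat 0 := by
  rw [PySem.List.pyRange_one_append 0 ((y.length - m : Nat) : Int) ((y.length : Int) + (m : Int))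
    (by positivity) (by omega), List.map_append]
  congr 1
  · rw [PySem.List.pyRange_one]
    simp only [sub_zero, Int.toNat_natCast, zero_add, List.map_map]
    have h2 : ∀ j ∈ List.range (y.length - m),
        ((fun i => if i ≥ (y.length : Int) - (m : Int) then 0 else PySem.List.pyGetD y (i + (m : Int)) 0)
          ∘ fun k : Nat => (k : Int)) j = y.getD (j + m) 0 := by
      intro j hj
      rw [List.mem_range] at hj
      simp only [Function.comp]
      rw [if_neg (by omega), (by push_cast; ring : ((j : Nat) : Int) + (m : Int) = ((j + m : Nat) : Int)),
        PySem.List.pyGetD_natCast]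
    rw [List.map_congr_left h2]
    apply List.ext_getElem (by simp)
    intro i h1 h2
    simp only [List.getElem_map, List.getElem_range, List.getElem_drop]
    rw [List.getD_eq_getElem y 0 (by simp at h1; omega)]
    congr 1
    simp at h1; omega
  · rw [List.eq_replicate_iff]
    refine ⟨?_, ?_⟩
    · rw [List.length_map, PySem.List.length_pyRange_one, List.length_drop]
    · intro b hb
      simp only [List.mem_map] at hb
      obtain ⟨i, hi, rfl⟩ := hb
      rw [PySem.List.mem_pyRange_one] at hi
      rw [if_pos (by omega)]

-- A's prepend loop for n < 0 is an ascending arithmetic progression from x's head minus m, then x.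
theorem l2_neg (m : Nat) (x : List Int) :
    (PySem.List.pyRange 0 (m : Int) 1).foldl
      (fun l2 _ => (PySem.List.pyGetD l2 0 0 - 1) :: l2) x
    = (PySem.List.pyRange (m : Int) 0 (-1)).map
        (fun i => PySem.List.pyGetD x 0 0 - i) ++ x := by
  induction m with
  | zero =>
    simp [PySem.List.pyRange_one_eq_nil, PySem.List.pyRange_neg_one_eq_nil]
  | succ m ih =>
    have hc : ((m + 1 : Nat) : Int) = (m : Int) + 1 := by push_cast; ring
    rw [hc, PySem.List.pyRange_one_succ_right (by positivity : (0:Int) ≤ (m:Int)),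
      List.foldl_append, ih]
    rw [PySem.List.pyRange_neg_one_cons (by omega : (0:Int) < (m:Int) + 1)]
    have hhead : PySem.List.pyGetD
        ((PySem.List.pyRange (m : Int) 0 (-1)).map (fun i => PySem.List.pyGetD x 0 0 - i) ++ x) 0 0
        = PySem.List.pyGetD x 0 0 - (m : Int) := by
      rcases Nat.eq_zero_or_pos m with hm | hm
      · subst hm
        simp [PySem.List.pyRange_neg_one_eq_nil]
      · rw [PySem.List.pyRange_neg_one_cons (by exact_mod_cast hm : (0:Int) < (m:Int))]
        simp [PySem.List.pyGetD_zero_cons]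
    simp only [List.foldl_cons, List.foldl_nil, hhead, List.map_cons,
      (by ring : (m:Int) + 1 - 1 = (m:Int))]
    congr 1
    ring

-- The countdown progression A produces equals B's ascending one.
theorem prog_neg (m : Nat) (c : Int) :
    (PySem.List.pyRange (m : Int) 0 (-1)).map (fun i => c - i)
    = (PySem.List.pyRange 0 (m : Int) 1).map (fun i => c - (m : Int) + i) := by
  rw [PySem.List.pyRange_neg_one, PySem.List.pyRange_one]
  simp only [sub_zero, Int.toNat_natCast, List.map_map]
  apply List.map_congr_left
  intro j hj
  simp only [Function.comp]
  omega

-- A's ascending extension from 1 equals B's from 0.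
theorem prog_pos (k : Nat) (c : Int) :
    (PySem.List.pyRange 1 ((k : Int) + 1) 1).map (fun i => c + i)
    = (PySem.List.pyRange 0 (k : Int) 1).map (fun i => c + 1 + i) := by
  rw [PySem.List.pyRange_one, PySem.List.pyRange_one]
  simp only [add_sub_cancel_right, sub_zero, Int.toNat_natCast, List.map_map]
  apply List.map_congr_left
  intro j hj
  simp only [Function.comp]
  omega

-- Dropping m from the one-sidedly padded line gives the drop-then-pad block.
theorem drop_pad (y : List Int) (m : Nat) :
    (y ++ List.replicate (2 * m) (0 : Int)).drop m
    = y.drop m ++ List.replicate ((y.length : Int) + (m : Int) - ((y.drop m).length : Int)).toNat 0 := by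
  rw [List.drop_append, List.drop_replicate]
  congr 1
  congr 1
  simp only [List.length_drop]
  omega

-- ===== VERDICT (by name: the statement is the Claim_ definition above) =====
theorem atraso_spec : Claim_equal_atraso := by
  intro y n x _ hpre
  unfold Spec_atraso atraso atraso_alt
  by_cases hn : n ≥ 0
  · simp only [if_pos hn]
    obtain ⟨k, rfl⟩ := Int.eq_ofNat_of_zero_le hn
    have hm0 : max (-(k : Int)) 0 = 0 := by omega
    have hp : max ((k : Int)) 0 = (k : Int) := by omega
    refine Prod.ext ?_ ?_
    · simp only [hm0, hp, Int.toNat_natCast, mul_zero, Int.toNat_zero, List.replicate_zero,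
        List.append_nil, PySem.List.slice_zero_start, PySem.List.slice_none_none]
      simpa using l_pos y k
    · have hpre' : k = 0 ∨ x ≠ [] := by
        rcases hpre with h | h
        · left; exact_mod_cast h
        · right; exact h
      simp only [hm0, hp]
      rw [l2_pos k x hpre', prog_pos k (PySem.List.pyGetD x (-1) 0)]
      simp [PySem.List.pyRange_one_eq_nil]
  · simp only [if_neg hn]
    obtain ⟨m, hmeq⟩ := Int.eq_ofNat_of_zero_le (by omega : (0:Int) ≤ -n)
    have hneq : n = -(m : Int) := by omega
    subst hneq
    have hmpos : 0 < m := by omega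
    have hm : max (-(-(m : Int))) 0 = (m : Int) := by omega
    have hp0 : max (-(m : Int)) 0 = 0 := by omega
    refine Prod.ext ?_ ?_
    · have hA := l_neg y m hmpos
      have harg : ∀ i : Int, i - -(m : Int) = i + (m : Int) := by intro i; omega
      have hsub : (y.length : Int) - -(m : Int) = (y.length : Int) + (m : Int) := by omega
      have hadd : (y.length : Int) + -(m : Int) = (y.length : Int) - (m : Int) := by omega
      simp only [hsub, hadd, harg, ge_iff_le, hA, hm, hp0, Int.toNat_zero,
        List.replicate_zero, List.nil_append]
      rw [PySem.List.slice_from_natCast]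
      rw [(by omega : ((2 : Int) * (m : Int)).toNat = 2 * m)]
      rw [drop_pad y m]
    · simp only [hp0, neg_neg]
      rw [l2_neg m x, prog_neg m (PySem.List.pyGetD x 0 0)]
      simp [PySem.List.pyRange_one_eq_nil]
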